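-- pv_equiv track=rewrite | github.com/cogent3/cogent3 | src/cogent3/parse/nexus.py | split_tree_info
-- ===== SOURCE A (Python) =====
-- def split_tree_info(tree_info):
--     """Returns header, table, and dnd info from tree section of Nexus file.:
--
--     Expects to receive the output of get_tree_info"""
--     header = []
--     trans_table = []
--     dnd = []
--     state = "in_header"
--
--     for line in tree_info:
--         line_lower = line.lower()
--         if state == "in_header":
--             header.append(line)
--             if line_lower.strip() == "translate":
--                 state = "in_trans"
--             elif line_lower.startswith("tree"):
--                 state = "in_dnd"
--                 dnd.append(line)
--
--         elif state == "in_trans":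
--             trans_table.append(line)
--             if line.strip() == ";":
--                 state = "in_dnd"
--
--         elif state == "in_dnd":
--             dnd.append(line)
--     return header, trans_table, dnd
-- ===== SOURCE B (Python) =====
-- def split_tree_info(tree_info):
--     header = []
--     trans_table = []
--     dnd = []
--     it = iter(tree_info)
--     for line in it:
--         header.append(line)
--         low = line.lower()
--         if low.strip() == "translate":
--             for tline in it:
--                 trans_table.append(tline)
--                 if tline.strip() == ";":
--                     break
--             dnd.extend(it)
--             break
--         elif low.startswith("tree"):
--             dnd.append(line)
--             dnd.extend(it)
--             break
--     return header, trans_table, dnd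
-- ===== Notes on version B (the rewrite author's own statement) =====
-- stated objective: alternative
-- what changed: Replaces the string-flag state machine (one loop dispatching on a 'state' variable) with phased consumption of a single iterator: an outer header loop that, on the 'translate' or 'tree' trigger, runs a nested trans-table loop and then drains the iterator into dnd.
import Mathlib
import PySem

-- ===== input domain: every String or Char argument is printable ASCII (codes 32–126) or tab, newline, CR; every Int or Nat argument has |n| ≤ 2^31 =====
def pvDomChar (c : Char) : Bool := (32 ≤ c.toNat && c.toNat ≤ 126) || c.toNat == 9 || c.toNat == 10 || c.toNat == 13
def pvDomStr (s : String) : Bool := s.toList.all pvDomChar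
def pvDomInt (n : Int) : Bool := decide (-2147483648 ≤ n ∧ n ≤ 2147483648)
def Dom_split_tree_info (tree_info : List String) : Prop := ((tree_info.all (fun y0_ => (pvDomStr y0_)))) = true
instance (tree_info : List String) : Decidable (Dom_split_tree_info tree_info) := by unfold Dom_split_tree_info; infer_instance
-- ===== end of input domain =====

-- ===== PORT A =====
-- A's loop body, step for step (the Python string state variable kept as-is).
def aStep (acc : List String × List String × List String × String) (line : String) :
    List String × List String × List String × String :=
  let header := acc.1
  let trans_table := acc.2.1
  let dnd := acc.2.2.1
  let state := acc.2.2.2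
  let line_lower := PySem.Str.lower line
  if state == "in_header" then
    let header := header ++ [line]
    if PySem.Str.strip line_lower == "translate" then (header, trans_table, dnd, "in_trans")
    else if PySem.Str.startswith line_lower "tree" then (header, trans_table, dnd ++ [line], "in_dnd")
    else (header, trans_table, dnd, state)
  else if state == "in_trans" then
    let trans_table := trans_table ++ [line]
    if PySem.Str.strip line == ";" then (header, trans_table, dnd, "in_dnd")
    else (header, trans_table, dnd, state)
  else if state == "in_dnd" then (header, trans_table, dnd ++ [line], state)
  else acc

-- State machine over a foldl of aStep, as in the Python.
def split_tree_info (tree_info : List String) : List String × List String × List String :=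
  let r := tree_info.foldl aStep ([], [], [], "in_header")
  (r.1, r.2.1, r.2.2.1)

-- ===== PORT B =====
-- B's inner trans-table loop: consume until a line stripping to ";", return (trans_table, rest).
def bTransPhase : List String → List String × List String
  | [] => ([], [])
  | t :: rest =>
    if PySem.Str.strip t == ";" then ([t], rest)
    else
      let r := bTransPhase rest
      (t :: r.1, r.2)

-- B's outer header loop over the same (single) stream; triggers hand the remainder to a phase.
def bHeaderPhase : List String → List String × List String × List String
  | [] => ([], [], [])
  | line :: rest =>
    let low := PySem.Str.lower line
    if PySem.Str.strip low == "translate" then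
      let r := bTransPhase rest
      ([line], r.1, r.2)
    else if PySem.Str.startswith low "tree" then
      ([line], [], line :: rest)
    else
      let r := bHeaderPhase rest
      (line :: r.1, r.2.1, r.2.2)

def split_tree_info_alt (tree_info : List String) : List String × List String × List String :=
  bHeaderPhase tree_info

-- ===== PRECONDITION & SPEC =====
def Spec_split_tree_info (tree_info : List String) (out : List String × List String × List String) : Prop := out = split_tree_info_alt tree_info
instance (tree_info : List String) (out : List String × List String × List String) : Decidable (Spec_split_tree_info tree_info out) := by unfold Spec_split_tree_info; infer_instance

-- ===== CLAIM (what is proved, stated in full; the proofs are below) =====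
def Claim_equal_split_tree_info : Prop := ∀ (tree_info : List String), Dom_split_tree_info tree_info → Spec_split_tree_info tree_info (split_tree_info tree_info)

-- ===== LEMMAS AND PROOFS =====

theorem step_dnd (h t d : List String) (x : String) :
    aStep (h, t, d, "in_dnd") x = (h, t, d ++ [x], "in_dnd") := by
  simp [aStep]

theorem step_trans_semi (h t d : List String) (x : String)
    (hx : PySem.Str.strip x = ";") :
    aStep (h, t, d, "in_trans") x = (h, t ++ [x], d, "in_dnd") := by
  simp [aStep, hx]

theorem step_trans_other (h t d : List String) (x : String)
    (hx : ¬ PySem.Str.strip x = ";") :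
    aStep (h, t, d, "in_trans") x = (h, t ++ [x], d, "in_trans") := by
  simp [aStep, hx]

theorem step_header_translate (h t d : List String) (x : String)
    (h1 : PySem.Str.strip (PySem.Str.lower x) = "translate") :
    aStep (h, t, d, "in_header") x = (h ++ [x], t, d, "in_trans") := by
  simp [aStep, h1]

theorem step_header_tree (h t d : List String) (x : String)
    (h1 : ¬ PySem.Str.strip (PySem.Str.lower x) = "translate")
    (h2 : PySem.Chars.startswith (PySem.Chars.lower x.toList) ['t', 'r', 'e', 'e'] = true) :
    aStep (h, t, d, "in_header") x = (h ++ [x], t, d ++ [x], "in_dnd") := by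
  simp [aStep, h1, h2]

theorem step_header_other (h t d : List String) (x : String)
    (h1 : ¬ PySem.Str.strip (PySem.Str.lower x) = "translate")
    (h2 : ¬ PySem.Chars.startswith (PySem.Chars.lower x.toList) ['t', 'r', 'e', 'e'] = true) :
    aStep (h, t, d, "in_header") x = (h ++ [x], t, d, "in_header") := by
  simp [aStep, h1, h2]

theorem dnd_fold (xs : List String) (h t d : List String) :
    xs.foldl aStep (h, t, d, "in_dnd") = (h, t, d ++ xs, "in_dnd") := by
  induction xs generalizing d with
  | nil => simp
  | cons x xs ih =>
    rw [List.foldl_cons, step_dnd, ih]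
    simp

theorem trans_fold (xs : List String) (h t d : List String) :
    xs.foldl aStep (h, t, d, "in_trans")
      = (h, t ++ (bTransPhase xs).1, d ++ (bTransPhase xs).2,
         (xs.foldl aStep (h, t, d, "in_trans")).2.2.2) := by
  induction xs generalizing t with
  | nil => simp [bTransPhase]
  | cons x xs ih =>
    by_cases hx : PySem.Str.strip x = ";"
    · rw [List.foldl_cons, step_trans_semi _ _ _ _ hx, dnd_fold]
      simp [bTransPhase, hx]
    · rw [List.foldl_cons, step_trans_other _ _ _ _ hx, ih]
      simp [bTransPhase, hx]

theorem header_fold (xs : List String) (h : List String) :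
    xs.foldl aStep (h, [], [], "in_header")
      = (h ++ (bHeaderPhase xs).1, (bHeaderPhase xs).2.1, (bHeaderPhase xs).2.2,
         (xs.foldl aStep (h, [], [], "in_header")).2.2.2) := by
  induction xs generalizing h with
  | nil => simp [bHeaderPhase]
  | cons x xs ih =>
    by_cases h1 : PySem.Str.strip (PySem.Str.lower x) = "translate"
    · rw [List.foldl_cons, step_header_translate _ _ _ _ h1, trans_fold]
      simp [bHeaderPhase, h1]
    · by_cases h2 : PySem.Chars.startswith (PySem.Chars.lower x.toList) ['t', 'r', 'e', 'e'] = true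
      · rw [List.foldl_cons, step_header_tree _ _ _ _ h1 h2, dnd_fold]
        simp [bHeaderPhase, h1, h2]
      · rw [List.foldl_cons, step_header_other _ _ _ _ h1 h2, ih]
        simp [bHeaderPhase, h1, h2]

-- ===== VERDICT (by name: the statement is the Claim_ definition above) =====
theorem split_tree_info_spec : Claim_equal_split_tree_info := by
  intro tree_info _
  show split_tree_info tree_info = split_tree_info_alt tree_info
  show ((tree_info.foldl aStep ([], [], [], "in_header")).1,
        (tree_info.foldl aStep ([], [], [], "in_header")).2.1,
        (tree_info.foldl aStep ([], [], [], "in_header")).2.2.1) = bHeaderPhase tree_info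
  rw [header_fold tree_info []]
  simp
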